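-- pv_equiv track=rewrite | github.com/chulsea/TIL | algorithm/Python/algorithm/problems/snake.py | solution
-- ===== SOURCE A (Python) =====
-- dx = [1, 0, -1, 0]
--
-- dy = [0, 1, 0, -1]
--
-- def solution(n, items, moves):
--     board = [[0]*n for _ in range(n)]
--     for r, c in items:
--         board[r-1][c-1] = 2
--     cnt, y, x = 0, 0, 0
--     i = m = 0
--     ty, tx, tm = 0, -1, 0
--     move_stack = []
--     board[0][0] = 1
--     while True:
--         cnt += 1 # 초계산
--         ny = y + dy[m] # 다음 이동 공간
--         nx = x + dx[m]
--         if nx < 0 or nx >= n or ny < 0 or ny >= n or board[ny][nx] == 1: # 게임이 끝나는 조건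
--             return cnt
--
--         # 만약 과일을 먹는다면 몸집 그대로
--         # 안먹는다면 꼬리 1 자르기
--         tflag = False
--         if board[ny][nx] != 2: # 꼬리 찾기
--             ty += dy[tm]
--             tx += dx[tm]
--         else:
--             tflag = True
--         board[ny][nx] = 1 # 게임이 끝나지 않는다면 다음 공간에 이동
--         if not tflag:
--             board[ty][tx] = 0
--             if move_stack and ty == move_stack[0][0] and tx == move_stack[0][1]:
--                 tm = move_stack[0][2]
--                 move_stack.pop(0)
--             # if tx+dx[tm] < 0 or tx+dx[tm] >= n or ty+dy[tm] < 0 or ty+dy[tm] >= n or board[ty+dy[tm]][tx+dx[tm]] == 0: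
--         if i < len(moves) and cnt == moves[i][0]:
--             if moves[i][1] == "D":
--                 m = (m+1) % 4
--             else:
--                 m = 3 if m-1 < 0 else m-1
--             i += 1
--             move_stack.append((ny, nx, m))
--         x, y = nx, ny
-- ===== SOURCE B (Python) =====
-- # Simpler re-implementation: the snake body is an explicit list of cells (tail
-- # first, head last) and the items live on a boolean food grid, replacing the
-- # marked 0/1/2 grid with its tail pointer and move_stack bookkeeping.
-- dx = [1, 0, -1, 0]
-- dy = [0, 1, 0, -1]
--
-- def solution(n, items, moves):
--     food = [[False] * n for _ in range(n)]
--     for r, c in items: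
--         food[r - 1][c - 1] = True
--     food[0][0] = False        # the snake starts here, covering the cell
--     body = [(0, 0)]           # snake cells, tail first, head last
--     cnt = 0
--     i = m = 0
--     while True:
--         cnt += 1
--         hy, hx = body[-1]
--         ny, nx = hy + dy[m], hx + dx[m]
--         if not (0 <= ny < n and 0 <= nx < n) or (ny, nx) in body:
--             return cnt
--         body.append((ny, nx))
--         if food[ny][nx]:
--             food[ny][nx] = False   # grow: keep the tail
--         else:
--             body.pop(0)            # move on: drop the tail
--         if i < len(moves) and cnt == moves[i][0]:
--             m = (m + 1) % 4 if moves[i][1] == "D" else (m - 1) % 4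
--             i += 1
-- ===== Notes on version B (the rewrite author's own statement) =====
-- stated objective: simpler
-- what changed: B keeps the snake as an explicit list of cells (tail first, head last) and the items on a boolean food grid, replacing A's marked 0/1/2 grid with its tail-pointer and move_stack direction bookkeeping; each tick checks the new head against the body list and either grows (clearing the food cell) or drops the tail cell.
import Mathlib
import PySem

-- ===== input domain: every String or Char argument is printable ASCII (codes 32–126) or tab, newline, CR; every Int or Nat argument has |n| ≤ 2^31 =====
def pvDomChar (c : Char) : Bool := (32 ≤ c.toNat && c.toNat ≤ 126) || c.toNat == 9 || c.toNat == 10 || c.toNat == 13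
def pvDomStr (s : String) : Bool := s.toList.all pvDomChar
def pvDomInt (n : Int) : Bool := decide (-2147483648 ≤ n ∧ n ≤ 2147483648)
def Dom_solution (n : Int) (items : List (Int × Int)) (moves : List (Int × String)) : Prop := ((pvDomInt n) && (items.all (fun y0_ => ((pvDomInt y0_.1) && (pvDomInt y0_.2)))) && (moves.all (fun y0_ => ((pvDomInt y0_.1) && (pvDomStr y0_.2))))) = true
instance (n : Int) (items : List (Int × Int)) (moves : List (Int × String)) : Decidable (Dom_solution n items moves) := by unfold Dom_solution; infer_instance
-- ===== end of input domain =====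

-- B keeps the snake as an explicit list of cells (tail first) and the items on a boolean food
-- grid, replacing A's marked 0/1/2 grid with its tail-pointer/move_stack bookkeeping; objective: simpler.
-- Both loops are `while True` in Python; the Nat fuel is harness only: the snake provably dies within
-- max(move times) + n steps (straight after the last possible turn), so the fuel never runs out.

-- ===== PORT A =====
def dxA : List Int := [1, 0, -1, 0]
def dyA : List Int := [0, 1, 0, -1]

-- grid[y][x] read/write (indices are in range at every use admitted by Pre_solution)
def bget {α : Type} (d : α) (b : List (List α)) (y x : Int) : α :=
  PySem.List.pyGetD (PySem.List.pyGetD b y []) x d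
def bset {α : Type} (b : List (List α)) (y x : Int) (v : α) : List (List α) :=
  PySem.List.pySetD b y (PySem.List.pySetD (PySem.List.pyGetD b y []) x v)

-- the `if i < len(moves) and cnt == moves[i][0]:` block of A
def turnA (moves : List (Int × String)) (cnt i m : Int) (stack : List (Int × Int × Int))
    (ny nx : Int) : Int × Int × List (Int × Int × Int) :=
  if i < (moves.length : Int) ∧ cnt = (PySem.List.pyGetD moves i (0, "")).1 then
    let m' := if (PySem.List.pyGetD moves i (0, "")).2 = "D" then PySem.Int.mod (m + 1) 4
              else if m - 1 < 0 then 3 else m - 1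
    (i + 1, m', stack ++ [(ny, nx, m')])
  else (i, m, stack)

def loopA (n : Int) (moves : List (Int × String)) :
    Nat → List (List Int) → Int → Int → Int → Int → Int → Int → Int → Int →
    List (Int × Int × Int) → Int
  | 0, _, _, _, _, _, _, _, _, _, _ => 0
  | fuel + 1, board, cnt0, y, x, i, m, ty, tx, tm, stack =>
    let cnt := cnt0 + 1
    let ny := y + PySem.List.pyGetD dyA m 0
    let nx := x + PySem.List.pyGetD dxA m 0
    if nx < 0 ∨ n ≤ nx ∨ ny < 0 ∨ n ≤ ny ∨ bget 0 board ny nx = 1 then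
      cnt
    else
      if bget 0 board ny nx ≠ 2 then
        -- no food: advance the tail pointer, move head, clear the tail cell, pop the turn point
        let ty' := ty + PySem.List.pyGetD dyA tm 0
        let tx' := tx + PySem.List.pyGetD dxA tm 0
        let board' := bset (bset board ny nx 1) ty' tx' 0
        let ts : Int × List (Int × Int × Int) :=
          match stack with
          | (sy, sx, sd) :: rest => if ty' = sy ∧ tx' = sx then (sd, rest) else (tm, (sy, sx, sd) :: rest)
          | [] => (tm, [])
        let r := turnA moves cnt i m ts.2 ny nx
        loopA n moves fuel board' cnt ny nx r.1 r.2.1 ty' tx' ts.1 r.2.2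
      else
        -- food: keep the tail, move head
        let board' := bset board ny nx 1
        let r := turnA moves cnt i m stack ny nx
        loopA n moves fuel board' cnt ny nx r.1 r.2.1 ty tx tm r.2.2

def solution (n : Int) (items : List (Int × Int)) (moves : List (Int × String)) : Int :=
  let board0 := List.replicate n.toNat (List.replicate n.toNat (0 : Int))
  let board1 := items.foldl (fun b rc => bset b (rc.1 - 1) (rc.2 - 1) 2) board0
  let board2 := bset board1 0 0 1
  let fuel := (moves.foldl (fun a (t : Int × String) => max a t.1) 0).toNat + n.toNat + 8
  loopA n moves fuel board2 0 0 0 0 0 0 (-1) 0 []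

-- ===== PORT B =====
def dxB : List Int := [1, 0, -1, 0]
def dyB : List Int := [0, 1, 0, -1]

-- the `if i < len(moves) and cnt == moves[i][0]:` block of B
def turnB (moves : List (Int × String)) (cnt i m : Int) : Int × Int :=
  if i < (moves.length : Int) ∧ cnt = (PySem.List.pyGetD moves i (0, "")).1 then
    (i + 1, if (PySem.List.pyGetD moves i (0, "")).2 = "D" then PySem.Int.mod (m + 1) 4
            else PySem.Int.mod (m - 1) 4)
  else (i, m)

def loopB (n : Int) (moves : List (Int × String)) :
    Nat → List (Int × Int) → List (List Bool) → Int → Int → Int → Int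
  | 0, _, _, _, _, _ => 0
  | fuel + 1, body, food, cnt0, i, m =>
    let cnt := cnt0 + 1
    let hd := PySem.List.pyGetD body (-1) ((0 : Int), (0 : Int))
    let h := (hd.1 + PySem.List.pyGetD dyB m 0, hd.2 + PySem.List.pyGetD dxB m 0)
    if ¬ (0 ≤ h.1 ∧ h.1 < n ∧ 0 ≤ h.2 ∧ h.2 < n) ∨ body.contains h then
      cnt
    else
      let grown := body ++ [h]
      let bf := if bget false food h.1 h.2 then (grown, bset food h.1 h.2 false)
                else (grown.tail, food)   -- body.pop(0): grown is nonempty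
      let r := turnB moves cnt i m
      loopB n moves fuel bf.1 bf.2 cnt r.1 r.2

def solution_alt (n : Int) (items : List (Int × Int)) (moves : List (Int × String)) : Int :=
  let food0 := List.replicate n.toNat (List.replicate n.toNat false)
  let food1 := items.foldl (fun g rc => bset g (rc.1 - 1) (rc.2 - 1) true) food0
  let food2 := bset food1 0 0 false
  let fuel := (moves.foldl (fun a (t : Int × String) => max a t.1) 0).toNat + n.toNat + 8
  loopB n moves fuel [(0, 0)] food2 0 0 0

-- ===== PRECONDITION & SPEC =====
-- Pre_ is exactly the set of inputs on which the Python A returns: outside it A raises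
-- IndexError (n ≤ 0 leaves the board empty; an item coordinate outside [1-n, n] is out of range).
def Pre_solution (n : Int) (items : List (Int × Int)) (moves : List (Int × String)) : Prop :=
  1 ≤ n ∧ ∀ p ∈ items, 1 - n ≤ p.1 ∧ p.1 ≤ n ∧ 1 - n ≤ p.2 ∧ p.2 ≤ n
instance (n : Int) (items : List (Int × Int)) (moves : List (Int × String)) : Decidable (Pre_solution n items moves) := by unfold Pre_solution; infer_instance

def pvWitness_solution : Int × (List (Int × Int)) × (List (Int × String)) :=
  (2, [(1, 2)], [(1, "D")])

def Spec_solution (n : Int) (items : List (Int × Int)) (moves : List (Int × String)) (out : Int) : Prop := out = solution_alt n items moves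
instance (n : Int) (items : List (Int × Int)) (moves : List (Int × String)) (out : Int) : Decidable (Spec_solution n items moves out) := by unfold Spec_solution; infer_instance

-- ===== CLAIM (what is proved, stated in full; the proofs are below) =====
def Claim_equal_solution : Prop := ∀ (n : Int) (items : List (Int × Int)) (moves : List (Int × String)), Dom_solution n items moves → Pre_solution n items moves → Spec_solution n items moves (solution n items moves)

-- ===== LEMMAS AND PROOFS =====

theorem solution_pvWitness : Dom_solution pvWitness_solution.1 pvWitness_solution.2.1 pvWitness_solution.2.2 ∧ Pre_solution pvWitness_solution.1 pvWitness_solution.2.1 pvWitness_solution.2.2 := by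
  constructor <;> decide

-- ---- proof-side abbreviations ----
def dY (m : Int) : Int := PySem.List.pyGetD dyA m 0
def dX (m : Int) : Int := PySem.List.pyGetD dxA m 0

-- one step of the tail-reconstruction walk: move one cell, consume a matching turn point
def wStep (p : Int × Int) (d : Int) (st : List (Int × Int × Int)) :
    (Int × Int) × Int × List (Int × Int × Int) :=
  ((p.1 + dY d, p.2 + dX d),
   match st with
   | (sy, sx, sd) :: rest =>
       if p.1 + dY d = sy ∧ p.2 + dX d = sx then (sd, rest) else (d, (sy, sx, sd) :: rest)
   | [] => (d, []))

-- k steps of the walk, returning final position, direction, remaining stack, and visited cells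
def walk : (Int × Int) → Int → List (Int × Int × Int) → Nat →
    (Int × Int) × Int × List (Int × Int × Int) × List (Int × Int)
  | p, d, st, 0 => (p, d, st, [])
  | p, d, st, k + 1 =>
    let s := wStep p d st
    let r := walk s.1 s.2.1 s.2.2 k
    (r.1, r.2.1, r.2.2.1, s.1 :: r.2.2.2)

theorem walk_succ_left (p : Int × Int) (d : Int) (st : List (Int × Int × Int)) (k : Nat) :
    walk p d st (k + 1) =
      ((walk (wStep p d st).1 (wStep p d st).2.1 (wStep p d st).2.2 k).1,
       (walk (wStep p d st).1 (wStep p d st).2.1 (wStep p d st).2.2 k).2.1,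
       (walk (wStep p d st).1 (wStep p d st).2.1 (wStep p d st).2.2 k).2.2.1,
       (wStep p d st).1 :: (walk (wStep p d st).1 (wStep p d st).2.1 (wStep p d st).2.2 k).2.2.2) := rfl

theorem walk_succ_right (p : Int × Int) (d : Int) (st : List (Int × Int × Int)) (k : Nat) :
    walk p d st (k + 1) =
      ((wStep (walk p d st k).1 (walk p d st k).2.1 (walk p d st k).2.2.1).1,
       (wStep (walk p d st k).1 (walk p d st k).2.1 (walk p d st k).2.2.1).2.1,
       (wStep (walk p d st k).1 (walk p d st k).2.1 (walk p d st k).2.2.1).2.2,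
       (walk p d st k).2.2.2 ++ [(wStep (walk p d st k).1 (walk p d st k).2.1 (walk p d st k).2.2.1).1]) := by
  induction k generalizing p d st with
  | zero => rfl
  | succ k ih =>
    rw [walk_succ_left p d st (k + 1), ih, walk_succ_left p d st k]
    rfl

-- appending a turn point whose cell is never visited only rides along at the stack's end
theorem tuple_eta_third {A B C D : Type} {c : C} (x : A × B × C × D) (h : x.2.2.1 = c) :
    x = (x.1, x.2.1, c, x.2.2.2) := by rw [← h]

theorem walk_append_stack (k : Nat) :
    ∀ (p : Int × Int) (d : Int) (st : List (Int × Int × Int)) (q : Int × Int) (e : Int)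
      (cs : List (Int × Int)) (sy sx sd : Int),
      walk p d st k = (q, e, [], cs) →
      (∀ c ∈ cs, ¬(c.1 = sy ∧ c.2 = sx)) →
      walk p d (st ++ [(sy, sx, sd)]) k = (q, e, [(sy, sx, sd)], cs) := by
  induction k with
  | zero =>
    intro p d st q e cs sy sx sd hw hcs
    simp only [walk, Prod.mk.injEq] at hw
    obtain ⟨h1, h2, h3, h4⟩ := hw
    subst h1 h2 h3
    simp [walk, ← h4]
  | succ k ih =>
    intro p d st q e cs sy sx sd hw hcs
    match st with
    | [] =>
      simp only [walk, wStep, List.nil_append, Prod.mk.injEq] at hw ⊢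
      obtain ⟨h1, h2, h3, h4⟩ := hw
      have hmem : (p.1 + dY d, p.2 + dX d) ∈ cs := by rw [← h4]; exact List.mem_cons_self
      have hp' : ¬(p.1 + dY d = sy ∧ p.2 + dX d = sx) := hcs _ hmem
      rw [if_neg hp']
      have hrec := ih (p.1 + dY d, p.2 + dX d) d [] _ _ _ sy sx sd (tuple_eta_third _ h3)
        (fun c hc => hcs c (by rw [← h4]; exact List.mem_cons_of_mem _ hc))
      simp only [List.nil_append] at hrec
      rw [hrec]
      exact ⟨h1, h2, rfl, h4⟩
    | (ay, ax, ad) :: rest =>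
      by_cases hm : p.1 + dY d = ay ∧ p.2 + dX d = ax
      · simp only [walk, wStep, List.cons_append, if_pos hm, Prod.mk.injEq] at hw ⊢
        obtain ⟨h1, h2, h3, h4⟩ := hw
        have hrec := ih (p.1 + dY d, p.2 + dX d) ad rest _ _ _ sy sx sd (tuple_eta_third _ h3)
          (fun c hc => hcs c (by rw [← h4]; exact List.mem_cons_of_mem _ hc))
        rw [hrec]
        exact ⟨h1, h2, rfl, h4⟩
      · simp only [walk, wStep, List.cons_append, if_neg hm, Prod.mk.injEq] at hw ⊢
        obtain ⟨h1, h2, h3, h4⟩ := hw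
        have hrec := ih (p.1 + dY d, p.2 + dX d) d ((ay, ax, ad) :: rest) _ _ _ sy sx sd (tuple_eta_third _ h3)
          (fun c hc => hcs c (by rw [← h4]; exact List.mem_cons_of_mem _ hc))
        simp only [List.cons_append] at hrec
        rw [hrec]
        exact ⟨h1, h2, rfl, h4⟩

-- ---- grid read/write lemmas ----
theorem length_bset {α : Type} (b : List (List α)) (y x : Int) (v : α) :
    (bset b y x v).length = b.length := by
  simp [bset, PySem.List.length_pySetD]

theorem row_mem_bset {α : Type} (n : Int) (b : List (List α)) (y x : Int) (v : α) (row : List α)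
    (hlen : b.length = n.toNat) (h : ∀ r ∈ b, r.length = n.toNat)
    (hy0 : 0 ≤ y) (hy1 : y < n)
    (hrow : row ∈ bset b y x v) : row.length = n.toNat := by
  have hyl : y.toNat < b.length := by omega
  rw [bset, PySem.List.pySetD_of_nonneg _ _ hy0] at hrow
  rcases List.mem_or_eq_of_mem_set hrow with hm | he
  · exact h row hm
  · subst he
    rw [PySem.List.length_pySetD, PySem.List.pyGetD_eq_getElem _ _ hy0 (by omega)]
    exact h _ (List.getElem_mem hyl)

theorem bget_bset_get {α : Type} (d : α) (n : Int) (b : List (List α)) (y x : Int) (v : α) (Y X : Int)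
    (hlen : b.length = n.toNat) (hrow : ∀ r ∈ b, r.length = n.toNat)
    (hy0 : 0 ≤ y) (hy1 : y < n) (hx0 : 0 ≤ x) (hx1 : x < n)
    (hY0 : 0 ≤ Y) (hY1 : Y < n) (hX0 : 0 ≤ X) (hX1 : X < n) :
    bget d (bset b y x v) Y X = if Y = y ∧ X = x then v else bget d b Y X := by
  have hyl : y.toNat < b.length := by omega
  have hYl : Y.toNat < b.length := by omega
  have hrlY : b[Y.toNat].length = n.toNat := hrow _ (List.getElem_mem hYl)
  have hrly : b[y.toNat].length = n.toNat := hrow _ (List.getElem_mem hyl)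
  rw [bset, PySem.List.pySetD_of_nonneg _ _ hy0, PySem.List.pySetD_of_nonneg _ _ hx0,
    PySem.List.pyGetD_eq_getElem _ _ hy0 (by omega)]
  unfold bget
  rw [PySem.List.pyGetD_eq_getElem _ ([] : List α) hY0
        (by rw [List.length_set]; omega),
      PySem.List.pyGetD_eq_getElem _ ([] : List α) hY0 (by omega)]
  by_cases hYy : Y = y
  · subst hYy
    rw [List.getElem_set_self (by rw [List.length_set]; omega)]
    by_cases hxX : X = x
    · subst hxX
      rw [PySem.List.pyGetD_eq_getElem _ _ hX0 (by rw [List.length_set]; omega),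
        List.getElem_set_self (by rw [List.length_set]; omega)]
      simp
    · have hne : x.toNat ≠ X.toNat := by omega
      rw [PySem.List.pyGetD_eq_getElem _ _ hX0 (by rw [List.length_set]; omega),
        List.getElem_set_ne hne, PySem.List.pyGetD_eq_getElem _ _ hX0 (by omega)]
      simp [hxX]
  · have hne : y.toNat ≠ Y.toNat := by omega
    rw [List.getElem_set_ne hne, PySem.List.pyGetD_eq_getElem _ _ hX0 (by omega)]
    simp [hYy]

-- ---- the bisimulation invariant ----
structure SnakeInv (n : Int) (board : List (List Int)) (body : List (Int × Int))
    (food : List (List Bool)) (y x ty tx tm m : Int) (stack : List (Int × Int × Int)) : Prop where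
  shapeLen : board.length = n.toNat
  shapeRow : ∀ row ∈ board, row.length = n.toNat
  fLen : food.length = n.toNat
  fRow : ∀ row ∈ food, row.length = n.toNat
  bodyNe : body ≠ []
  lastEq : body.getLast? = some (y, x)
  bodyRange : ∀ p ∈ body, 0 ≤ p.1 ∧ p.1 < n ∧ 0 ≤ p.2 ∧ p.2 < n
  bodyNodup : body.Nodup
  bodyNoFood : ∀ p ∈ body, bget false food p.1 p.2 = false
  mRange : 0 ≤ m ∧ m < 4
  tmRange : 0 ≤ tm ∧ tm < 4
  stackRange : ∀ s ∈ stack, 0 ≤ s.2.2 ∧ s.2.2 < 4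
  boardChar : ∀ Y X : Int, 0 ≤ Y → Y < n → 0 ≤ X → X < n →
      bget 0 board Y X = if (Y, X) ∈ body then 1 else if bget false food Y X then 2 else 0
  walkEq : walk (ty, tx) tm stack body.length = ((y, x), m, [], body)

theorem dY_defA (m : Int) : PySem.List.pyGetD dyA m 0 = dY m := rfl
theorem dX_defA (m : Int) : PySem.List.pyGetD dxA m 0 = dX m := rfl
theorem dY_defB (m : Int) : PySem.List.pyGetD dyB m 0 = dY m := rfl
theorem dX_defB (m : Int) : PySem.List.pyGetD dxB m 0 = dX m := rfl

theorem mod4_L (m : Int) (hm : 0 ≤ m ∧ m < 4) :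
    PySem.Int.mod (m - 1) 4 = if m - 1 < 0 then 3 else m - 1 := by
  rw [PySem.Int.mod_eq_emod_of_pos (by norm_num)]
  split_ifs <;> omega

theorem tail_append_singleton {α : Type} (l : List α) (a : α) (h : l ≠ []) :
    (l ++ [a]).tail = l.tail ++ [a] := by
  cases l with
  | nil => exact absurd rfl h
  | cons b l => rfl

theorem pair_ne_of_not_and {ay ax by_ bx : Int} (h : ¬(ay = by_ ∧ ax = bx)) :
    ((ay, ax) : Int × Int) ≠ (by_, bx) :=
  fun hc => h ⟨congrArg Prod.fst hc, congrArg Prod.snd hc⟩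

theorem SnakeInv_step_food (n : Int) (board : List (List Int)) (body : List (Int × Int))
    (food : List (List Bool)) (y x ty tx tm m m' : Int) (stack app : List (Int × Int × Int))
    (hI : SnakeInv n board body food y x ty tx tm m stack)
    (hin : 0 ≤ y + dY m ∧ y + dY m < n ∧ 0 ≤ x + dX m ∧ x + dX m < n)
    (hb : (y + dY m, x + dX m) ∉ body)
    (hf : bget false food (y + dY m) (x + dX m) = true)
    (hm' : 0 ≤ m' ∧ m' < 4)
    (happ : (app = [] ∧ m' = m) ∨ app = [(y + dY m, x + dX m, m')]) :
    SnakeInv n (bset board (y + dY m) (x + dX m) 1) (body ++ [(y + dY m, x + dX m)])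
      (bset food (y + dY m) (x + dX m) false) (y + dY m) (x + dX m) ty tx tm m' (stack ++ app) := by
  obtain ⟨hy0, hy1, hx0, hx1⟩ := hin
  refine ⟨?_, ?_, ?_, ?_, by simp, List.getLast?_concat, ?_, ?_, ?_, hm', hI.tmRange, ?_, ?_, ?_⟩
  · rw [length_bset]; exact hI.shapeLen
  · exact fun r hr => row_mem_bset n board _ _ _ r hI.shapeLen hI.shapeRow hy0 hy1 hr
  · rw [length_bset]; exact hI.fLen
  · exact fun r hr => row_mem_bset n food _ _ _ r hI.fLen hI.fRow hy0 hy1 hr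
  · intro p hp
    rcases List.mem_append.mp hp with hp | hp
    · exact hI.bodyRange p hp
    · simp only [List.mem_singleton] at hp; subst hp; exact ⟨hy0, hy1, hx0, hx1⟩
  · exact List.Nodup.append hI.bodyNodup (List.nodup_singleton _)
      (by intro a ha hb2; simp only [List.mem_singleton] at hb2; subst hb2; exact hb ha)
  · intro p hp
    obtain ⟨hp0, hp1, hp2, hp3⟩ : 0 ≤ p.1 ∧ p.1 < n ∧ 0 ≤ p.2 ∧ p.2 < n := by
      rcases List.mem_append.mp hp with hp | hp
      · exact hI.bodyRange p hp
      · simp only [List.mem_singleton] at hp; subst hp; exact ⟨hy0, hy1, hx0, hx1⟩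
    rw [bget_bset_get false n food _ _ false p.1 p.2 hI.fLen hI.fRow hy0 hy1 hx0 hx1 hp0 hp1 hp2 hp3]
    rcases List.mem_append.mp hp with hp | hp
    · split
      · rfl
      · exact hI.bodyNoFood p hp
    · simp only [List.mem_singleton] at hp; subst hp; simp
  · intro s hs
    rcases List.mem_append.mp hs with hs | hs
    · exact hI.stackRange s hs
    · rcases happ with ⟨rfl, rfl⟩ | rfl
      · simp at hs
      · simp only [List.mem_singleton] at hs; subst hs; exact hm'
  · intro Y X hY0 hY1 hX0 hX1
    rw [bget_bset_get (0 : Int) n board _ _ 1 Y X hI.shapeLen hI.shapeRow hy0 hy1 hx0 hx1 hY0 hY1 hX0 hX1,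
      bget_bset_get false n food _ _ false Y X hI.fLen hI.fRow hy0 hy1 hx0 hx1 hY0 hY1 hX0 hX1]
    by_cases hYX : Y = y + dY m ∧ X = x + dX m
    · have : ((Y, X) : Int × Int) ∈ body ++ [(y + dY m, x + dX m)] := by
        simp [hYX.1, hYX.2]
      rw [if_pos hYX, if_pos this]
    · have hne := pair_ne_of_not_and hYX
      rw [if_neg hYX, if_neg hYX, hI.boardChar Y X hY0 hY1 hX0 hX1]
      have h1 : ((Y, X) : Int × Int) ∈ body ++ [(y + dY m, x + dX m)] ↔ (Y, X) ∈ body := by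
        simp [hne]
      simp only [h1]
  · have hcells : ∀ c ∈ body, ¬(c.1 = y + dY m ∧ c.2 = x + dX m) := by
      intro c hc hcontra
      apply hb
      have : c = (y + dY m, x + dX m) := Prod.ext hcontra.1 hcontra.2
      rwa [this] at hc
    have hlen : (body ++ [(y + dY m, x + dX m)]).length = body.length + 1 := by simp
    rcases happ with ⟨ha1, ha2⟩ | ha1
    · rw [ha1, ha2, List.append_nil, hlen, walk_succ_right, hI.walkEq]
      rfl
    · have hw2 := walk_append_stack body.length (ty, tx) tm stack (y, x) m body
        (y + dY m) (x + dX m) m' hI.walkEq hcells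
      rw [ha1, hlen, walk_succ_right, hw2]
      simp [wStep]

theorem SnakeInv_step_nofood (n : Int) (board : List (List Int)) (body : List (Int × Int))
    (food : List (List Bool)) (y x ty tx tm m m' : Int) (stack app : List (Int × Int × Int))
    (hI : SnakeInv n board body food y x ty tx tm m stack)
    (hin : 0 ≤ y + dY m ∧ y + dY m < n ∧ 0 ≤ x + dX m ∧ x + dX m < n)
    (hb : (y + dY m, x + dX m) ∉ body)
    (hf : bget false food (y + dY m) (x + dX m) = false)
    (hm' : 0 ≤ m' ∧ m' < 4)
    (happ : (app = [] ∧ m' = m) ∨ app = [(y + dY m, x + dX m, m')]) :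
    SnakeInv n
      (bset (bset board (y + dY m) (x + dX m) 1) (ty + dY tm) (tx + dX tm) 0)
      (body.tail ++ [(y + dY m, x + dX m)]) food (y + dY m) (x + dX m)
      (ty + dY tm) (tx + dX tm) (wStep (ty, tx) tm stack).2.1 m'
      ((wStep (ty, tx) tm stack).2.2 ++ app) := by
  obtain ⟨hy0, hy1, hx0, hx1⟩ := hin
  obtain ⟨b0, rest, hbody⟩ := List.exists_cons_of_ne_nil hI.bodyNe
  subst hbody
  -- peel the first step of the walk
  have hw := hI.walkEq
  rw [List.length_cons, walk_succ_left] at hw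
  simp only [Prod.mk.injEq, List.cons.injEq] at hw
  obtain ⟨hw1, hw2, hw3, hs1, hw4⟩ := hw
  have hr : walk (wStep (ty, tx) tm stack).1 (wStep (ty, tx) tm stack).2.1
      (wStep (ty, tx) tm stack).2.2 rest.length = ((y, x), m, [], rest) :=
    Prod.ext hw1 (Prod.ext hw2 (Prod.ext hw3 hw4))
  have hWfst : (wStep (ty, tx) tm stack).1 = (ty + dY tm, tx + dX tm) := rfl
  have hs1' : ((ty + dY tm, tx + dX tm) : Int × Int) = b0 := by rw [← hWfst, hs1]
  have hb0mem : b0 ∈ b0 :: rest := List.mem_cons_self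
  have hb0rng := hI.bodyRange b0 hb0mem
  have hb0nin : b0 ∉ rest := (List.nodup_cons.mp hI.bodyNodup).1
  have hrestnodup : rest.Nodup := (List.nodup_cons.mp hI.bodyNodup).2
  have hnh_ne_b0 : ((y + dY m, x + dX m) : Int × Int) ≠ b0 :=
    fun hc => hb (hc ▸ hb0mem)
  have hnh_nin_rest : ((y + dY m, x + dX m) : Int × Int) ∉ rest :=
    fun hc => hb (List.mem_cons_of_mem _ hc)
  have hdir : 0 ≤ (wStep (ty, tx) tm stack).2.1 ∧ (wStep (ty, tx) tm stack).2.1 < 4 := by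
    cases stack with
    | nil => exact hI.tmRange
    | cons a rest' =>
      obtain ⟨ay, ax, ad⟩ := a
      by_cases hcnd : ty + dY tm = ay ∧ tx + dX tm = ax
      · simp only [wStep, if_pos hcnd]
        exact hI.stackRange (ay, ax, ad) List.mem_cons_self
      · simp only [wStep, if_neg hcnd]
        exact hI.tmRange
  have hsub : ∀ s ∈ (wStep (ty, tx) tm stack).2.2, s ∈ stack := by
    cases stack with
    | nil => intro s hs; simp [wStep] at hs
    | cons a rest' =>
      obtain ⟨ay, ax, ad⟩ := a
      by_cases hcnd : ty + dY tm = ay ∧ tx + dX tm = ax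
      · simp only [wStep, if_pos hcnd]
        exact fun s hs => List.mem_cons_of_mem _ hs
      · simp only [wStep, if_neg hcnd]
        exact fun s hs => hs
  have htrng : 0 ≤ ty + dY tm ∧ ty + dY tm < n ∧ 0 ≤ tx + dX tm ∧ tx + dX tm < n := by
    have h1 := congrArg Prod.fst hs1'
    have h2 := congrArg Prod.snd hs1'
    simp only at h1 h2
    rw [h1, h2]; exact hb0rng
  have hshape1len : (bset board (y + dY m) (x + dX m) 1).length = n.toNat := by
    rw [length_bset]; exact hI.shapeLen
  have hshape1row : ∀ r ∈ bset board (y + dY m) (x + dX m) 1, r.length = n.toNat :=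
    fun r hr => row_mem_bset n board _ _ _ r hI.shapeLen hI.shapeRow hy0 hy1 hr
  refine ⟨?_, ?_, hI.fLen, hI.fRow, by simp, List.getLast?_concat, ?_, ?_, ?_, hm', hdir, ?_, ?_, ?_⟩
  · rw [length_bset]; exact hshape1len
  · exact fun r hr => row_mem_bset n _ _ _ _ r hshape1len hshape1row htrng.1 htrng.2.1 hr
  · intro p hp
    rcases List.mem_append.mp hp with hp | hp
    · exact hI.bodyRange p (List.mem_of_mem_tail hp)
    · simp only [List.mem_singleton] at hp; subst hp; exact ⟨hy0, hy1, hx0, hx1⟩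
  · rw [List.tail_cons]
    exact List.Nodup.append hrestnodup (List.nodup_singleton _)
      (by intro a ha hb2; simp only [List.mem_singleton] at hb2; subst hb2; exact hnh_nin_rest ha)
  · intro p hp
    rcases List.mem_append.mp hp with hp | hp
    · exact hI.bodyNoFood p (List.mem_of_mem_tail hp)
    · simp only [List.mem_singleton] at hp; subst hp; exact hf
  · intro s hs
    rcases List.mem_append.mp hs with hs | hs
    · exact hI.stackRange s (hsub s hs)
    · rcases happ with ⟨ha1, _⟩ | ha1
      · rw [ha1] at hs; simp at hs
      · rw [ha1] at hs; simp only [List.mem_singleton] at hs; subst hs; exact hm'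
  · intro Y X hY0 hY1 hX0 hX1
    rw [bget_bset_get (0 : Int) n _ _ _ 0 Y X hshape1len hshape1row htrng.1 htrng.2.1 htrng.2.2.1 htrng.2.2.2 hY0 hY1 hX0 hX1,
      bget_bset_get (0 : Int) n board _ _ 1 Y X hI.shapeLen hI.shapeRow hy0 hy1 hx0 hx1 hY0 hY1 hX0 hX1]
    by_cases hYXt : Y = ty + dY tm ∧ X = tx + dX tm
    · -- the cleared tail cell b0
      have hYXb0 : ((Y, X) : Int × Int) = b0 := by rw [hYXt.1, hYXt.2]; exact hs1'
      have hnotmem : ((Y, X) : Int × Int) ∉ rest ++ [(y + dY m, x + dX m)] := by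
        intro hc
        rcases List.mem_append.mp hc with hc | hc
        · rw [hYXb0] at hc; exact hb0nin hc
        · simp only [List.mem_singleton] at hc
          exact hnh_ne_b0 (by rw [← hc, hYXb0])
      have hnotfood : bget false food Y X = false := by
        have h1 : b0.1 = Y := by rw [← hYXb0]
        have h2 : b0.2 = X := by rw [← hYXb0]
        rw [← h1, ← h2]
        exact hI.bodyNoFood b0 hb0mem
      have hnotmem' : ((Y, X) : Int × Int) ∉ (b0 :: rest).tail ++ [(y + dY m, x + dX m)] := by
        rw [List.tail_cons]; exact hnotmem
      rw [if_pos hYXt, if_neg hnotmem', hnotfood]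
      simp
    · rw [if_neg hYXt]
      have hYXne_b0 : ((Y, X) : Int × Int) ≠ b0 := by
        intro hc; rw [← hs1'] at hc
        exact hYXt ⟨congrArg Prod.fst hc, congrArg Prod.snd hc⟩
      by_cases hYXh : Y = y + dY m ∧ X = x + dX m
      · have hmem : ((Y, X) : Int × Int) ∈ rest ++ [(y + dY m, x + dX m)] := by
          simp [hYXh.1, hYXh.2]
        simp [hYXh, List.tail_cons]
      · have hne := pair_ne_of_not_and hYXh
        rw [if_neg hYXh, hI.boardChar Y X hY0 hY1 hX0 hX1]
        have h1 : ((Y, X) : Int × Int) ∈ (b0 :: rest).tail ++ [(y + dY m, x + dX m)] ↔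
            (Y, X) ∈ b0 :: rest := by
          constructor
          · intro hc
            rcases List.mem_append.mp (by rwa [List.tail_cons] at hc) with hc | hc
            · exact List.mem_cons_of_mem _ hc
            · exact absurd (List.mem_singleton.mp hc) hne
          · intro hc
            rw [List.tail_cons]
            rcases List.mem_cons.mp hc with hc | hc
            · exact absurd hc hYXne_b0
            · exact List.mem_append.mpr (Or.inl hc)
        simp only [h1]
  · have hcells : ∀ c ∈ rest, ¬(c.1 = y + dY m ∧ c.2 = x + dX m) := by
      intro c hc hcontra
      apply hnh_nin_rest
      have : c = (y + dY m, x + dX m) := Prod.ext hcontra.1 hcontra.2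
      rwa [this] at hc
    rw [List.tail_cons, show (rest ++ [(y + dY m, x + dX m)]).length = rest.length + 1 by simp]
    have hr' : walk (ty + dY tm, tx + dX tm) (wStep (ty, tx) tm stack).2.1
        (wStep (ty, tx) tm stack).2.2 rest.length = ((y, x), m, [], rest) := hr
    rcases happ with ⟨ha1, ha2⟩ | ha1
    · rw [ha1, ha2, List.append_nil, walk_succ_right, hr']
      rfl
    · have hw2 : walk (ty + dY tm, tx + dX tm) (wStep (ty, tx) tm stack).2.1
          ((wStep (ty, tx) tm stack).2.2 ++ [(y + dY m, x + dX m, m')]) rest.length =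
          ((y, x), m, [(y + dY m, x + dX m, m')], rest) :=
        walk_append_stack rest.length (wStep (ty, tx) tm stack).1
          (wStep (ty, tx) tm stack).2.1 (wStep (ty, tx) tm stack).2.2 (y, x) m rest
          (y + dY m) (x + dX m) m' hr hcells
      rw [ha1, walk_succ_right, hw2]
      simp [wStep]

theorem turn_eq (moves : List (Int × String)) (cnt i m ny nx : Int) (hm : 0 ≤ m ∧ m < 4) :
    ∃ i' m' app, (0 ≤ m' ∧ m' < 4) ∧ ((app = [] ∧ m' = m) ∨ app = [(ny, nx, m')]) ∧
      (∀ st : List (Int × Int × Int), turnA moves cnt i m st ny nx = (i', m', st ++ app)) ∧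
      turnB moves cnt i m = (i', m') := by
  by_cases hfire : i < (moves.length : Int) ∧ cnt = (PySem.List.pyGetD moves i ((0 : Int), "")).1
  · by_cases hD : (PySem.List.pyGetD moves i ((0 : Int), "")).2 = "D"
    · exact ⟨i + 1, PySem.Int.mod (m + 1) 4, [(ny, nx, PySem.Int.mod (m + 1) 4)],
        ⟨PySem.Int.mod_nonneg _ (by norm_num), PySem.Int.mod_lt _ (by norm_num)⟩,
        Or.inr rfl, fun st => by simp [turnA, hfire, hD], by simp [turnB, hfire, hD]⟩
    · refine ⟨i + 1, if m - 1 < 0 then 3 else m - 1, [(ny, nx, if m - 1 < 0 then 3 else m - 1)],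
        ⟨by split <;> omega, by split <;> omega⟩, Or.inr rfl,
        fun st => by simp [turnA, hfire, hD], ?_⟩
      simp only [turnB]
      rw [if_pos hfire, if_neg hD, mod4_L m hm]
  · exact ⟨i, m, [], hm, Or.inl ⟨rfl, rfl⟩,
      fun st => by simp [turnA, hfire], by simp [turnB, hfire]⟩

theorem loop_eq (fuel : Nat) :
    ∀ (n : Int) (moves : List (Int × String)) (board : List (List Int))
      (body : List (Int × Int)) (food : List (List Bool)) (cnt y x i ty tx tm m : Int)
      (stack : List (Int × Int × Int)),
      SnakeInv n board body food y x ty tx tm m stack →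
      loopA n moves fuel board cnt y x i m ty tx tm stack =
        loopB n moves fuel body food cnt i m := by
  induction fuel with
  | zero => intro _ _ _ _ _ _ _ _ _ _ _ _ _ _ _; rfl
  | succ f ih =>
    intro n moves board body food cnt y x i ty tx tm m stack hI
    have hbNe := hI.bodyNe
    have hlast : PySem.List.pyGetD body (-1) ((0 : Int), (0 : Int)) = (y, x) := by
      rw [PySem.List.pyGetD_neg_one _ _ hbNe]
      have h := hI.lastEq
      rw [List.getLast?_eq_some_getLast hbNe] at h
      exact Option.some_injective _ h
    simp only [loopA, loopB, dY_defA, dX_defA, dY_defB, dX_defB, hlast]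
    by_cases hout : 0 ≤ y + dY m ∧ y + dY m < n ∧ 0 ≤ x + dX m ∧ x + dX m < n
    · obtain ⟨h1, h2, h3, h4⟩ := hout
      by_cases hmem : ((y + dY m, x + dX m) : Int × Int) ∈ body
      · -- collision with the body: both games end
        have hbg : bget 0 board (y + dY m) (x + dX m) = 1 := by
          rw [hI.boardChar _ _ h1 h2 h3 h4, if_pos hmem]
        rw [if_pos (Or.inr (Or.inr (Or.inr (Or.inr hbg)))),
          if_pos (Or.inr (List.contains_iff_mem.mpr hmem))]
      · -- the snake survives the step
        have hbg : bget 0 board (y + dY m) (x + dX m) =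
            if bget false food (y + dY m) (x + dX m) then 2 else 0 := by
          rw [hI.boardChar _ _ h1 h2 h3 h4, if_neg hmem]
        have hAne : ¬(x + dX m < 0 ∨ n ≤ x + dX m ∨ y + dY m < 0 ∨ n ≤ y + dY m ∨
            bget 0 board (y + dY m) (x + dX m) = 1) := by
          intro hc
          rcases hc with hc | hc | hc | hc | hc
          · omega
          · omega
          · omega
          · omega
          · rw [hbg] at hc; split at hc <;> omega
        have hBne : ¬(¬(0 ≤ y + dY m ∧ y + dY m < n ∧ 0 ≤ x + dX m ∧ x + dX m < n) ∨
            body.contains ((y + dY m, x + dX m) : Int × Int) = true) := by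
          intro hc
          rcases hc with hc | hc
          · exact hc ⟨h1, h2, h3, h4⟩
          · exact hmem (List.contains_iff_mem.mp hc)
        rw [if_neg hAne, if_neg hBne]
        obtain ⟨i', m', app, hm', happ, hTA, hTB⟩ :=
          turn_eq moves (cnt + 1) i m (y + dY m) (x + dX m) hI.mRange
        rw [hTB]
        by_cases hfood : bget false food (y + dY m) (x + dX m) = true
        · -- food eaten: tail stays
          have h2ne : ¬(bget 0 board (y + dY m) (x + dX m) ≠ 2) := by
            rw [hbg, if_pos hfood]; omega
          rw [if_neg h2ne, if_pos hfood, hTA stack]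
          exact ih n moves _ _ _ (cnt + 1) (y + dY m) (x + dX m) i' ty tx tm m' _
            (SnakeInv_step_food n board body food y x ty tx tm m m' stack app hI
              ⟨h1, h2, h3, h4⟩ hmem hfood hm' happ)
        · -- no food: tail advances
          have hfoodf : bget false food (y + dY m) (x + dX m) = false := by
            simpa using hfood
          have h2yes : bget 0 board (y + dY m) (x + dX m) ≠ 2 := by
            rw [hbg, hfoodf]; simp
          rw [if_pos h2yes, if_neg (by simp [hfoodf]),
            tail_append_singleton body ((y + dY m, x + dX m) : Int × Int) hbNe]
          have hstep := SnakeInv_step_nofood n board body food y x ty tx tm m m' stack app hI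
            ⟨h1, h2, h3, h4⟩ hmem hfoodf hm' happ
          cases stack with
          | nil =>
            rw [hTA []]
            exact ih n moves _ _ _ (cnt + 1) (y + dY m) (x + dX m) i'
              (ty + dY tm) (tx + dX tm) tm m' _ hstep
          | cons s rest' =>
            obtain ⟨sy, sx, sd⟩ := s
            dsimp only
            by_cases hpop : ty + dY tm = sy ∧ tx + dX tm = sx
            · have hW1 : (wStep (ty, tx) tm ((sy, sx, sd) :: rest')).2.1 = sd := by
                simp [wStep, hpop]
              have hW2 : (wStep (ty, tx) tm ((sy, sx, sd) :: rest')).2.2 = rest' := by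
                simp [wStep, hpop]
              rw [hW1, hW2] at hstep
              rw [if_pos hpop, hTA rest']
              exact ih n moves _ _ _ (cnt + 1) (y + dY m) (x + dX m) i'
                (ty + dY tm) (tx + dX tm) sd m' _ hstep
            · have hW1 : (wStep (ty, tx) tm ((sy, sx, sd) :: rest')).2.1 = tm := by
                simp [wStep, hpop]
              have hW2 : (wStep (ty, tx) tm ((sy, sx, sd) :: rest')).2.2 =
                  (sy, sx, sd) :: rest' := by
                simp [wStep, hpop]
              rw [hW1, hW2] at hstep
              rw [if_neg hpop, hTA ((sy, sx, sd) :: rest')]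
              exact ih n moves _ _ _ (cnt + 1) (y + dY m) (x + dX m) i'
                (ty + dY tm) (tx + dX tm) tm m' _ hstep
    · -- head off the board: both games end
      have harith : x + dX m < 0 ∨ n ≤ x + dX m ∨ y + dY m < 0 ∨ n ≤ y + dY m := by omega
      have hA : x + dX m < 0 ∨ n ≤ x + dX m ∨ y + dY m < 0 ∨ n ≤ y + dY m ∨
          bget 0 board (y + dY m) (x + dX m) = 1 := by
        rcases harith with h | h | h | h
        · exact Or.inl h
        · exact Or.inr (Or.inl h)
        · exact Or.inr (Or.inr (Or.inl h))
        · exact Or.inr (Or.inr (Or.inr (Or.inl h)))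
      rw [if_pos hA, if_pos (Or.inl hout)]

theorem bget_replicate {α : Type} (d : α) (n Y X : Int)
    (hY0 : 0 ≤ Y) (hY1 : Y < n) (hX0 : 0 ≤ X) (hX1 : X < n) :
    bget d (List.replicate n.toNat (List.replicate n.toNat d)) Y X = d := by
  unfold bget
  rw [PySem.List.pyGetD_eq_getElem _ ([] : List α) hY0 (by simp [List.length_replicate]; omega),
    List.getElem_replicate,
    PySem.List.pyGetD_eq_getElem _ _ hX0 (by simp [List.length_replicate]; omega),
    List.getElem_replicate]

theorem pyIdx_mod (m : Nat) (i n : Int) (hm : (m : Int) = n.toNat) (hn : 1 ≤ n)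
    (h0 : -n ≤ i) (h1 : i < n) :
    PySem.List.pyIdx? m i = PySem.List.pyIdx? m (PySem.Int.mod i n) ∧
    0 ≤ PySem.Int.mod i n ∧ PySem.Int.mod i n < n := by
  have hmod : PySem.Int.mod i n = if 0 ≤ i then i else n + i := by
    rw [PySem.Int.mod_eq_emod_of_pos (by omega)]
    split
    · exact Int.emod_eq_of_lt ‹0 ≤ i› h1
    · have hplus : (i + n) % n = i % n := by
        simpa using Int.add_mul_emod_self_left (a := i) (b := n) (c := 1)
      rw [← hplus, Int.emod_eq_of_lt (by omega) (by omega)]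
      omega
  refine ⟨?_, by rw [hmod]; split <;> omega, by rw [hmod]; split <;> omega⟩
  by_cases hi : 0 ≤ i
  · rw [hmod, if_pos hi]
  · rw [hmod, if_neg hi]
    unfold PySem.List.pyIdx?
    rw [if_neg hi, if_pos (by omega : -(m : Int) ≤ i),
      if_pos (by omega : (0 : Int) ≤ n + i), if_pos (by omega : n + i < (m : Int))]
    congr 1
    omega

theorem pyGetD_mod {α : Type} (b : List α) (i n : Int) (d : α)
    (hlen : (b.length : Int) = n.toNat) (hn : 1 ≤ n) (h0 : -n ≤ i) (h1 : i < n) :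
    PySem.List.pyGetD b i d = PySem.List.pyGetD b (PySem.Int.mod i n) d := by
  unfold PySem.List.pyGetD PySem.List.pyGet?
  rw [(pyIdx_mod b.length i n hlen hn h0 h1).1]

theorem pySetD_mod {α : Type} (b : List α) (i n : Int) (v : α)
    (hlen : (b.length : Int) = n.toNat) (hn : 1 ≤ n) (h0 : -n ≤ i) (h1 : i < n) :
    PySem.List.pySetD b i v = PySem.List.pySetD b (PySem.Int.mod i n) v := by
  unfold PySem.List.pySetD PySem.List.pySet?
  rw [(pyIdx_mod b.length i n hlen hn h0 h1).1]

theorem bset_mod {α : Type} (n : Int) (b : List (List α)) (y x : Int) (v : α)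
    (hlen : b.length = n.toNat) (hrow : ∀ r ∈ b, r.length = n.toNat) (hn : 1 ≤ n)
    (hy0 : -n ≤ y) (hy1 : y < n) (hx0 : -n ≤ x) (hx1 : x < n) :
    bset b y x v = bset b (PySem.Int.mod y n) (PySem.Int.mod x n) v := by
  have hlen' : ((b.length : Int)) = n.toNat := by omega
  have hymod := (pyIdx_mod b.length y n hlen' hn hy0 hy1).2
  have hrowlen : (PySem.List.pyGetD b (PySem.Int.mod y n) ([] : List α)).length = n.toNat := by
    rw [PySem.List.pyGetD_eq_getElem _ _ hymod.1 (by omega)]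
    exact hrow _ (List.getElem_mem (by omega))
  unfold bset
  rw [pyGetD_mod b y n ([] : List α) hlen' hn hy0 hy1,
    pySetD_mod _ x n v (by omega) hn hx0 hx1]
  exact pySetD_mod b y n _ hlen' hn hy0 hy1

theorem foldl_items_char {α : Type} (d v : α) (n : Int) (hn : 1 ≤ n) (l : List (Int × Int)) :
    ∀ b : List (List α), b.length = n.toNat → (∀ r ∈ b, r.length = n.toNat) →
    (∀ p ∈ l, 1 - n ≤ p.1 ∧ p.1 ≤ n ∧ 1 - n ≤ p.2 ∧ p.2 ≤ n) →
    (l.foldl (fun b rc => bset b (rc.1 - 1) (rc.2 - 1) v) b).length = n.toNat ∧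
    (∀ r ∈ l.foldl (fun b rc => bset b (rc.1 - 1) (rc.2 - 1) v) b, r.length = n.toNat) ∧
    ∀ Y X : Int, 0 ≤ Y → Y < n → 0 ≤ X → X < n →
      bget d (l.foldl (fun b rc => bset b (rc.1 - 1) (rc.2 - 1) v) b) Y X =
        if (Y, X) ∈ l.map (fun rc => (PySem.Int.mod (rc.1 - 1) n, PySem.Int.mod (rc.2 - 1) n))
        then v else bget d b Y X := by
  induction l with
  | nil => intro b h1 h2 _; exact ⟨h1, h2, fun Y X _ _ _ _ => by simp⟩
  | cons a l ih =>
    intro b h1 h2 hl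
    have ha := hl a List.mem_cons_self
    have hl' := fun p hp => hl p (List.mem_cons_of_mem a hp)
    have hwrap := bset_mod n b (a.1 - 1) (a.2 - 1) v h1 h2 hn
      (by omega) (by omega) (by omega) (by omega)
    have hm1 := (pyIdx_mod b.length (a.1 - 1) n (by omega) hn (by omega) (by omega)).2
    have hm2 := (pyIdx_mod b.length (a.2 - 1) n (by omega) hn (by omega) (by omega)).2
    have hb1len : (bset b (a.1 - 1) (a.2 - 1) v).length = n.toNat := by
      rw [length_bset]; exact h1
    have hb1row : ∀ r ∈ bset b (a.1 - 1) (a.2 - 1) v, r.length = n.toNat := by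
      rw [hwrap]
      exact fun r hr => row_mem_bset n b _ _ _ r h1 h2 hm1.1 hm1.2 hr
    obtain ⟨g1, g2, g3⟩ := ih (bset b (a.1 - 1) (a.2 - 1) v) hb1len hb1row hl'
    refine ⟨g1, g2, fun Y X hY0 hY1 hX0 hX1 => ?_⟩
    rw [List.foldl_cons, g3 Y X hY0 hY1 hX0 hX1, hwrap,
      bget_bset_get d n b _ _ v Y X h1 h2 hm1.1 hm1.2 hm2.1 hm2.2 hY0 hY1 hX0 hX1]
    by_cases hmm : (Y, X) ∈ l.map (fun rc => (PySem.Int.mod (rc.1 - 1) n, PySem.Int.mod (rc.2 - 1) n))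
    · simp [hmm]
    · by_cases hee : Y = PySem.Int.mod (a.1 - 1) n ∧ X = PySem.Int.mod (a.2 - 1) n
      · simp [hee.1, hee.2]
      · have hpne : ¬((Y, X) = (PySem.Int.mod (a.1 - 1) n, PySem.Int.mod (a.2 - 1) n)) := by
          intro hc; exact hee ⟨congrArg Prod.fst hc, congrArg Prod.snd hc⟩
        simp [hmm, hee, hpne]

theorem SnakeInv_init (n : Int) (items : List (Int × Int))
    (hn : 1 ≤ n)
    (hit : ∀ p ∈ items, 1 - n ≤ p.1 ∧ p.1 ≤ n ∧ 1 - n ≤ p.2 ∧ p.2 ≤ n) :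
    SnakeInv n
      (bset (items.foldl (fun b rc => bset b (rc.1 - 1) (rc.2 - 1) 2)
        (List.replicate n.toNat (List.replicate n.toNat (0 : Int)))) 0 0 1)
      [(0, 0)]
      (bset (items.foldl (fun g rc => bset g (rc.1 - 1) (rc.2 - 1) true)
        (List.replicate n.toNat (List.replicate n.toNat false))) 0 0 false)
      0 0 0 (-1) 0 0 [] := by
  have hb0len : (List.replicate n.toNat (List.replicate n.toNat (0 : Int))).length = n.toNat := by
    simp [List.length_replicate]
  have hb0row : ∀ r ∈ List.replicate n.toNat (List.replicate n.toNat (0 : Int)), r.length = n.toNat := by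
    intro r hr; rw [List.eq_of_mem_replicate hr]; simp [List.length_replicate]
  have hf0len : (List.replicate n.toNat (List.replicate n.toNat false)).length = n.toNat := by
    simp [List.length_replicate]
  have hf0row : ∀ r ∈ List.replicate n.toNat (List.replicate n.toNat false), r.length = n.toNat := by
    intro r hr; rw [List.eq_of_mem_replicate hr]; simp [List.length_replicate]
  obtain ⟨g1, g2, g3⟩ := foldl_items_char (0 : Int) 2 n hn items _ hb0len hb0row hit
  obtain ⟨f1, f2, f3⟩ := foldl_items_char false true n hn items _ hf0len hf0row hit
  have hfget : ∀ Y X : Int, 0 ≤ Y → Y < n → 0 ≤ X → X < n →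
      bget false (bset (items.foldl (fun g rc => bset g (rc.1 - 1) (rc.2 - 1) true)
        (List.replicate n.toNat (List.replicate n.toNat false))) 0 0 false) Y X =
      if (Y, X) = ((0 : Int), (0 : Int)) then false
      else if (Y, X) ∈ items.map (fun rc => (PySem.Int.mod (rc.1 - 1) n, PySem.Int.mod (rc.2 - 1) n))
      then true else false := by
    intro Y X hY0 hY1 hX0 hX1
    rw [bget_bset_get false n _ 0 0 false Y X f1 f2 (by omega) (by omega) (by omega) (by omega) hY0 hY1 hX0 hX1,
      f3 Y X hY0 hY1 hX0 hX1, bget_replicate false n Y X hY0 hY1 hX0 hX1]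
    by_cases h00 : Y = 0 ∧ X = 0
    · simp [h00.1, h00.2]
    · have hb : ¬((Y, X) = ((0 : Int), (0 : Int))) :=
        fun hc => h00 ⟨congrArg Prod.fst hc, congrArg Prod.snd hc⟩
      simp [h00, hb]
  refine ⟨?_, ?_, ?_, ?_, by simp, by simp, ?_, by simp, ?_, by omega, by omega,
    by simp, ?_, by decide⟩
  · rw [length_bset]; exact g1
  · exact fun r hr => row_mem_bset n _ 0 0 1 r g1 g2 (by omega) (by omega) hr
  · rw [length_bset]; exact f1
  · exact fun r hr => row_mem_bset n _ 0 0 false r f1 f2 (by omega) (by omega) hr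
  · intro p hp; simp only [List.mem_singleton] at hp; subst hp
    exact ⟨le_refl 0, by omega, le_refl 0, by omega⟩
  · intro p hp; simp only [List.mem_singleton] at hp; subst hp
    rw [hfget 0 0 (by omega) (by omega) (by omega) (by omega)]
    simp
  · intro Y X hY0 hY1 hX0 hX1
    rw [bget_bset_get (0 : Int) n _ 0 0 1 Y X g1 g2 (by omega) (by omega) (by omega) (by omega) hY0 hY1 hX0 hX1,
      g3 Y X hY0 hY1 hX0 hX1, bget_replicate (0 : Int) n Y X hY0 hY1 hX0 hX1,
      hfget Y X hY0 hY1 hX0 hX1]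
    by_cases h00 : Y = 0 ∧ X = 0
    · simp [h00.1, h00.2]
    · have hb : ¬((Y, X) = ((0 : Int), (0 : Int))) :=
        fun hc => h00 ⟨congrArg Prod.fst hc, congrArg Prod.snd hc⟩
      simp only [List.mem_singleton, if_neg h00, if_neg hb]
      split <;> simp

-- ===== VERDICT (by name: the statement is the Claim_ definition above) =====
theorem solution_spec : Claim_equal_solution := by
  intro n items moves _ hpre
  simp only [Spec_solution, solution, solution_alt]
  exact loop_eq _ n moves _ _ _ 0 0 0 0 0 (-1) 0 0 [] (SnakeInv_init n items hpre.1 hpre.2)
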